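-- pv_equiv track=rewrite | github.com/alvinchong-sf/algorithms | code_signal/arcade_graphs/great_renaming.py | solution
-- ===== SOURCE A (Python) =====
-- def solution(roadRegister):
--     n = len(roadRegister)
--     buckets = [[] for x in range(n)]
--     results = [[False for y in range(n)] for x1 in range(n)]
--
--     for r in range(n):
--         for c in range(n):
--             cell = roadRegister[r][c]
--             if cell:
--                 buckets[r].append(c)
--
--     for row in range(n):
--         increment_convert(buckets, row, n)
--
--     for r1 in range(n):
--         for c1 in range(len(buckets[r1])):
--             new_row = (r1+1) % n
--             new_col = int(buckets[r1][c1])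
--             results[new_row][new_col] = True
--
--     return results
--
-- def increment_convert(buckets, row, n):
--     for r in range(n):
--         if r == row: continue
--         for c in range(len(buckets[r])):
--             cell = buckets[r][c]
--             if type(cell) in [int] and cell == row:
--                 buckets[r][c] = str((cell + 1) % n)
-- ===== SOURCE B (Python) =====
-- def solution(roadRegister):
--     n = len(roadRegister)
--     results = [[False] * n for _ in range(n)]
--     for r in range(n):
--         row = roadRegister[r]
--         for c in range(n):
--             if row[c]:
--                 results[(r + 1) % n][c if r == c else (c + 1) % n] = True
--     return results
-- ===== Notes on version B (the rewrite author's own statement) =====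
-- stated objective: faster
-- what changed: B writes each renamed edge directly into the result in one O(n^2) pass over the matrix, eliminating A's buckets, its O(n^3) increment_convert sweep and its int/str type-tag round-trip.
import Mathlib
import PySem

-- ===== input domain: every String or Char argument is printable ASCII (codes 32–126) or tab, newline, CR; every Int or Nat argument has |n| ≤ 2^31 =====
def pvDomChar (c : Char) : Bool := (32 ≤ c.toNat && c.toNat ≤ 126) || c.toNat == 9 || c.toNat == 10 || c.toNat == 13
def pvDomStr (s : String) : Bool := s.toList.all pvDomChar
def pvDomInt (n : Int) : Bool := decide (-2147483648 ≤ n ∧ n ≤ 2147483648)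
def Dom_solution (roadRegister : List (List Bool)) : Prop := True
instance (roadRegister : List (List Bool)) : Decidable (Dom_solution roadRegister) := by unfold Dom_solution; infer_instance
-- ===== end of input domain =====

-- B replaces A's bucket lists, O(n^3) increment_convert sweep and int/str tag round-trip by one
-- direct O(n^2) pass writing each renamed edge straight into the result matrix.

-- ===== PORT A =====
-- a Python list cell that holds either an int or a str (A stores both in `buckets`)
inductive PyCell
  | i : Nat → PyCell
  | s : String → PyCell
deriving DecidableEq, Repr

-- Python `res[i][j] = True`; exact here: every index this program writes is ≥ 0 and < len
def setTrue (res : List (List Bool)) (i j : Nat) : List (List Bool) :=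
  res.set i ((res.getD i []).set j true)

-- str(m) for the nonneg ints this program stores, ported by hand (decimal digits, most significant
-- first — exact for m ≥ 0, which is all A ever converts: (cell+1) % n with 0 ≤ cell < n)
def natToChars (m : Nat) : List Char :=
  if _h : m < 10 then [Char.ofNat (48 + m)]
  else natToChars (m / 10) ++ [Char.ofNat (48 + m % 10)]
decreasing_by exact Nat.div_lt_self (by omega) (by omega)

-- int(t) for the strings this program stores, ported by hand (t is always a nonempty string of
-- decimal digits produced by str above, on which Python's int() is exactly this left fold)
def charsToNat (cs : List Char) : Nat := cs.foldl (fun a c => a * 10 + (c.toNat - 48)) 0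

-- inner loop of increment_convert: `for c in range(len(buckets[r])): ...` mutating buckets[r] in place
def incRowList (row n : Nat) (l : List PyCell) : List PyCell :=
  (List.range l.length).foldl (fun l' c =>
    match l'.getD c (PyCell.i 0) with
    | PyCell.i v => if v = row then l'.set c (PyCell.s (String.ofList (natToChars ((v + 1) % n)))) else l'
    | PyCell.s _ => l') l

-- increment_convert(buckets, row, n); row mutation buckets[r][c] = ... is ported as rebuilding row r
def incrementConvert (buckets : List (List PyCell)) (row n : Nat) : List (List PyCell) :=
  (List.range n).foldl (fun b r =>
    if r = row then b else b.set r (incRowList row n (b.getD r []))) buckets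

-- int(buckets[r1][c1]); every str cell is a digit string, where int() is charsToNat
def cellToNat (cell : PyCell) : Nat :=
  match cell with
  | .i v => v
  | .s t => charsToNat t.toList

-- indexing roadRegister[r][c] with 0 ≤ r < n, 0 ≤ c < n ≤ len(row): getD is exact under Pre_
def solution (roadRegister : List (List Bool)) : List (List Bool) :=
  let n := roadRegister.length
  let buckets0 : List (List PyCell) := (List.range n).map (fun _ => [])
  let results0 : List (List Bool) := (List.range n).map (fun _ => (List.range n).map (fun _ => false))
  let buckets1 := (List.range n).foldl (fun b r =>
    (List.range n).foldl (fun b c =>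
      if (roadRegister.getD r []).getD c false then b.set r (b.getD r [] ++ [PyCell.i c]) else b) b) buckets0
  let buckets2 := (List.range n).foldl (fun b row => incrementConvert b row n) buckets1
  (List.range n).foldl (fun res r1 =>
    (List.range (buckets2.getD r1 []).length).foldl (fun res c1 =>
      setTrue res ((r1 + 1) % n) (cellToNat ((buckets2.getD r1 []).getD c1 (PyCell.i 0)))) res) results0

-- ===== PORT B =====
def solution_alt (roadRegister : List (List Bool)) : List (List Bool) :=
  let n := roadRegister.length
  let results0 : List (List Bool) := (List.range n).map (fun _ => (List.range n).map (fun _ => false))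
  (List.range n).foldl (fun res r =>
    let row := roadRegister.getD r []
    (List.range n).foldl (fun res c =>
      if row.getD c false then
        setTrue res ((r + 1) % n) (if r = c then c else (c + 1) % n)
      else res) res) results0

-- ===== PRECONDITION & SPEC =====
-- Pre_ excludes exactly the inputs where the Python A raises IndexError: a row shorter than the
-- register (A reads roadRegister[r][c] for every c < n; B reads row[c] the same way and raises too).
-- The totalized ports happen to agree even outside Pre_, so the proof below does not consume it;
-- Pre_ is stated because only inside it are the ports faithful to their Pythons.
def Pre_solution (roadRegister : List (List Bool)) : Prop :=
  ∀ row ∈ roadRegister, roadRegister.length ≤ row.length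
instance (roadRegister : List (List Bool)) : Decidable (Pre_solution roadRegister) := by
  unfold Pre_solution; infer_instance

def pvWitness_solution : List (List Bool) := [[true, false], [false, true]]

def Spec_solution (roadRegister : List (List Bool)) (out : List (List Bool)) : Prop := out = solution_alt roadRegister
instance (roadRegister : List (List Bool)) (out : List (List Bool)) : Decidable (Spec_solution roadRegister out) := by unfold Spec_solution; infer_instance

-- ===== CLAIM (what is proved, stated in full; the proofs are below) =====
def Claim_equal_solution : Prop := ∀ (roadRegister : List (List Bool)), Dom_solution roadRegister → Pre_solution roadRegister → Spec_solution roadRegister (solution roadRegister)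

-- ===== LEMMAS AND PROOFS =====

-- writing back the value already at r is a no-op
theorem pvSetGetD {α : Type} (b : List α) (r : Nat) (d : α) (hr : r < b.length) :
    b.set r (b.getD r d) = b := by
  rw [List.getD_eq_getElem b d hr]; exact List.set_getElem_self hr

-- the per-cell effect of increment_convert's pass for a given `row`
def pvCellStep (row n : Nat) : PyCell → PyCell
  | .i v => if v = row then .s (String.ofList (natToChars ((v + 1) % n))) else .i v
  | .s t => .s t

-- roadRegister[r][c] as read by both ports
def pvP (rr : List (List Bool)) (r c : Nat) : Bool := (rr.getD r []).getD c false

-- bucket r after the conversion passes for rows 0..m-1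
def pvQ (rr : List (List Bool)) (m r : Nat) : List PyCell :=
  ((List.range rr.length).filter (pvP rr r)).map
    (fun c => if c < m ∧ c ≠ r then PyCell.s (String.ofList (natToChars ((c + 1) % rr.length))) else PyCell.i c)

-- a fold over range m whose step touches only index r rewrites every position below m
theorem pvFoldlUpdate {α : Type} (d : α) (F : Nat → α → α) (G : Nat → List α → List α)
    (hG : ∀ (b : List α) (r : Nat), r < b.length → G r b = b.set r (F r (b.getD r d))) :
    ∀ (m : Nat) (b : List α), m ≤ b.length →
      ((List.range m).foldl (fun b' r => G r b') b).length = b.length ∧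
      ∀ i, ((List.range m).foldl (fun b' r => G r b') b).getD i d =
            if i < m then F i (b.getD i d) else b.getD i d := by
  intro m
  induction m with
  | zero => intro b _; simp
  | succ m ih =>
    intro b hm
    have hm' : m ≤ b.length := by omega
    obtain ⟨hlen, hget⟩ := ih b hm'
    rw [List.range_succ, List.foldl_append]
    set Om := (List.range m).foldl (fun b' r => G r b') b with hOm
    have hmlt : m < Om.length := by omega
    have hstep : G m Om = Om.set m (F m (b.getD m d)) := by
      have := hG Om m hmlt
      rw [this, hget m]; simp
    rw [List.foldl_cons, List.foldl_nil, hstep]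
    constructor
    · simpa using hlen
    · intro i
      by_cases hi : i = m
      · subst hi
        have : (Om.set i (F i (b.getD i d))).getD i d = F i (b.getD i d) := by
          rw [List.getD_eq_getElem?_getD, List.getElem?_set_self]
          · simp
          · exact hmlt
        rw [this]; simp
      · have : (Om.set m (F m (b.getD m d))).getD i d = Om.getD i d := by
          rw [List.getD_eq_getElem?_getD, List.getElem?_set_ne (by omega), ← List.getD_eq_getElem?_getD]
        rw [this, hget i]
        by_cases h2 : i < m
        · rw [if_pos h2, if_pos (by omega)]
        · rw [if_neg h2, if_neg (by omega)]

-- same fold started from a range-map: the result is the range-map of the rewritten values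
theorem pvFoldlUpdateMap {α : Type} (d : α) (F : Nat → α → α) (G : Nat → List α → List α)
    (hG : ∀ (b : List α) (r : Nat), r < b.length → G r b = b.set r (F r (b.getD r d)))
    (n : Nat) (q : Nat → α) :
    (List.range n).foldl (fun b r => G r b) ((List.range n).map q)
      = (List.range n).map (fun r => F r (q r)) := by
  obtain ⟨hlen, hget⟩ := pvFoldlUpdate d F G hG n ((List.range n).map q) (by simp)
  apply List.ext_getElem
  · simp [hlen]
  · intro i h1 h2
    have hin : i < n := by simpa using h2
    have e1 : ∀ (l : List α) (h : i < l.length), l[i] = l.getD i d := by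
      intro l h; rw [List.getD_eq_getElem?_getD, List.getElem?_eq_getElem h]; simp
    rw [e1 _ h1, e1 _ h2, hget i, if_pos hin]
    simp [List.getD_eq_getElem?_getD, hin]

-- index-independent version on an arbitrary list: the fold is a map
theorem pvFoldlUpdateId {α : Type} (d : α) (F : α → α) (G : Nat → List α → List α)
    (hG : ∀ (b : List α) (r : Nat), r < b.length → G r b = b.set r (F (b.getD r d)))
    (l : List α) :
    (List.range l.length).foldl (fun l' c => G c l') l = l.map F := by
  obtain ⟨hlen, hget⟩ := pvFoldlUpdate d (fun _ x => F x) G hG l.length l (le_refl _)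
  apply List.ext_getElem
  · simp [hlen]
  · intro i h1 h2
    have hin : i < l.length := by simpa using h2
    have e1 : ∀ (m : List α) (h : i < m.length), m[i] = m.getD i d := by
      intro m h; rw [List.getD_eq_getElem?_getD, List.getElem?_eq_getElem h]; simp
    rw [e1 _ h1, hget i, if_pos hin]
    simp [List.getD_eq_getElem?_getD, List.getElem?_eq_getElem hin]

-- the append loop of phase 1 only touches bucket r
theorem pvInnerAppend (p : Nat → Bool) (r : Nat) :
    ∀ (cs : List Nat) (b : List (List PyCell)), r < b.length →
      cs.foldl (fun b c => if p c then b.set r (b.getD r [] ++ [PyCell.i c]) else b) b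
        = b.set r (b.getD r [] ++ (cs.filter p).map PyCell.i) := by
  intro cs
  induction cs with
  | nil =>
    intro b hr
    simp only [List.foldl_nil, List.filter_nil, List.map_nil, List.append_nil]
    exact (pvSetGetD b r [] hr).symm
  | cons c cs ih =>
    intro b hr
    rw [List.foldl_cons]
    by_cases hc : p c
    · rw [if_pos hc]
      rw [ih _ (by simpa using hr)]
      have hget : ((b.set r (b.getD r [] ++ [PyCell.i c])).getD r []) = b.getD r [] ++ [PyCell.i c] := by
        rw [List.getD_eq_getElem?_getD, List.getElem?_set_self hr]; simp
      rw [hget, List.set_set, List.filter_cons_of_pos hc, List.map_cons]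
      simp [List.append_assoc]
    · rw [if_neg hc, ih _ hr, List.filter_cons_of_neg hc]

-- incRowList is the per-cell map pvCellStep
theorem pvIncRowMap (row n : Nat) (l : List PyCell) :
    incRowList row n l = l.map (pvCellStep row n) := by
  unfold incRowList
  apply pvFoldlUpdateId (PyCell.i 0) (pvCellStep row n)
  intro b r hr
  rcases h : b.getD r (PyCell.i 0) with v | t
  · simp only [pvCellStep]
    by_cases hv : v = row
    · rw [if_pos hv, if_pos hv]
    · rw [if_neg hv, if_neg hv, ← h, pvSetGetD b r _ hr]
  · simp only [pvCellStep]
    rw [← h, pvSetGetD b r _ hr]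

-- increment_convert on a range-map of buckets
theorem pvICmap (row n : Nat) (q : Nat → List PyCell) :
    incrementConvert ((List.range n).map q) row n
      = (List.range n).map (fun r => if r = row then q r else (q r).map (pvCellStep row n)) := by
  unfold incrementConvert
  have := pvFoldlUpdateMap ([] : List PyCell)
    (fun r x => if r = row then x else x.map (pvCellStep row n))
    (fun r b => if r = row then b else b.set r (incRowList row n (b.getD r [])))
    (by
      intro b r hr
      dsimp only
      by_cases h : r = row
      · rw [if_pos h, if_pos h]; exact (pvSetGetD b r [] hr).symm
      · rw [if_neg h, if_neg h, pvIncRowMap]) n q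
  simpa using this

-- phase 1: the bucket-building double loop
theorem pvPhase1 (rr : List (List Bool)) :
    (List.range rr.length).foldl (fun b r =>
        (List.range rr.length).foldl (fun b c =>
          if (rr.getD r []).getD c false then b.set r (b.getD r [] ++ [PyCell.i c]) else b) b)
      ((List.range rr.length).map (fun _ => ([] : List PyCell)))
    = (List.range rr.length).map (pvQ rr 0) := by
  have := pvFoldlUpdateMap ([] : List PyCell)
    (fun r x => x ++ (((List.range rr.length).filter (pvP rr r)).map PyCell.i))
    (fun r b => (List.range rr.length).foldl (fun b c =>
        if (rr.getD r []).getD c false then b.set r (b.getD r [] ++ [PyCell.i c]) else b) b)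
    (by intro b r hr; exact pvInnerAppend (pvP rr r) r (List.range rr.length) b hr)
    rr.length (fun _ => ([] : List PyCell))
  rw [this]
  apply List.map_congr_left
  intro r _
  simp only [List.nil_append, pvQ]
  apply List.map_congr_left
  intro c _
  rw [if_neg (by omega)]

-- phase 2: the n conversion passes
theorem pvPhase2 (rr : List (List Bool)) :
    ∀ m, m ≤ rr.length →
      (List.range m).foldl (fun b row => incrementConvert b row rr.length)
          ((List.range rr.length).map (pvQ rr 0))
        = (List.range rr.length).map (pvQ rr m) := by
  intro m
  induction m with
  | zero => intro _; simp
  | succ m ih =>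
    intro hm
    rw [List.range_succ, List.foldl_append, ih (by omega), List.foldl_cons, List.foldl_nil,
      pvICmap m rr.length (pvQ rr m)]
    apply List.map_congr_left
    intro r hr
    have hrn : r < rr.length := List.mem_range.mp hr
    by_cases h : r = m
    · rw [if_pos h]
      unfold pvQ
      apply List.map_congr_left
      intro c _
      by_cases hc : c < m ∧ c ≠ r
      · rw [if_pos hc, if_pos ⟨by omega, hc.2⟩]
      · rw [if_neg hc, if_neg (by omega)]
    · rw [if_neg h]
      unfold pvQ
      rw [List.map_map]
      apply List.map_congr_left
      intro c hc
      have hcn : c < rr.length := List.mem_range.mp (List.mem_of_mem_filter hc)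
      simp only [Function.comp]
      by_cases h1 : c < m ∧ c ≠ r
      · rw [if_pos h1]
        simp only [pvCellStep]
        rw [if_pos ⟨by omega, h1.2⟩]
      · rw [if_neg h1]
        simp only [pvCellStep]
        by_cases h2 : c = m
        · rw [if_pos h2, h2, if_pos ⟨by omega, by omega⟩]
        · rw [if_neg h2, if_neg (by omega)]

-- a fold over range(len(xs)) reading xs[i] is a fold over xs
theorem pvFoldIdx {α β : Type} (d : α) (g : β → α → β) :
    ∀ (xs : List α) (s0 : β),
      (List.range xs.length).foldl (fun s i => g s (xs.getD i d)) s0 = xs.foldl g s0 := by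
  intro xs
  induction xs with
  | nil => intro s0; simp
  | cons x t ih =>
    intro s0
    rw [List.length_cons, List.range_succ_eq_map, List.foldl_cons, List.foldl_map]
    simpa [List.getD] using ih (g s0 x)

-- decoding the converted cells: the decimal codec round-trips
theorem pvCharOfNat_toNat (n : Nat) (h : n < 55296) : (Char.ofNat n).toNat = n := by
  rw [Char.toNat_ofNat, if_pos (Or.inl h)]

theorem pvRoundtrip (m : Nat) : charsToNat (natToChars m) = m := by
  induction m using Nat.strong_induction_on with
  | _ m ih =>
    rw [natToChars]
    by_cases h : m < 10
    · rw [dif_pos h]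
      simp only [charsToNat, List.foldl_cons, List.foldl_nil]
      rw [pvCharOfNat_toNat _ (by omega)]
      omega
    · rw [dif_neg h]
      unfold charsToNat
      rw [List.foldl_append]
      have hm := ih (m / 10) (Nat.div_lt_self (by omega) (by omega))
      unfold charsToNat at hm
      rw [hm]
      simp only [List.foldl_cons, List.foldl_nil]
      rw [pvCharOfNat_toNat _ (by omega)]
      omega

theorem pvCellToNat_s (x : Nat) :
    cellToNat (PyCell.s (String.ofList (natToChars x))) = x := by
  simp [cellToNat, pvRoundtrip]

-- ===== VERDICT (by name: the statement is the Claim_ definition above) =====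
theorem solution_spec : Claim_equal_solution := by
  intro rr _ _
  unfold Spec_solution solution solution_alt
  simp only []
  rw [pvPhase1 rr, pvPhase2 rr rr.length (le_refl _)]
  apply PySem.List.foldl_congr_mem
  intro res r hr
  have hrn : r < rr.length := List.mem_range.mp hr
  have hgd : ((List.range rr.length).map (pvQ rr rr.length)).getD r [] = pvQ rr rr.length r := by
    rw [List.getD_eq_getElem?_getD, List.getElem?_map, List.getElem?_range hrn]; simp
  rw [hgd, pvFoldIdx (PyCell.i 0)
      (fun res cell => setTrue res ((r + 1) % rr.length) (cellToNat cell)) (pvQ rr rr.length r) res]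
  unfold pvQ
  rw [List.foldl_map,
    ← PySem.List.foldl_if_eq_foldl_filter (pvP rr r)
      (fun res c => setTrue res ((r + 1) % rr.length)
        (cellToNat (if c < rr.length ∧ c ≠ r
          then PyCell.s (String.ofList (natToChars ((c + 1) % rr.length))) else PyCell.i c)))
      (List.range rr.length) res]
  apply PySem.List.foldl_congr_mem
  intro res' c hc
  have hcn : c < rr.length := List.mem_range.mp hc
  show (if pvP rr r c then _ else res') = _
  unfold pvP
  by_cases hb : (rr.getD r []).getD c false
  · rw [if_pos hb, if_pos hb]
    by_cases hrc : r = c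
    · rw [if_neg (by omega), ← hrc, if_pos rfl]
      simp [cellToNat]
    · rw [if_pos ⟨hcn, by omega⟩, if_neg hrc, pvCellToNat_s]
  · rw [if_neg (by simpa using hb), if_neg (by simpa using hb)]
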